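-- pv_equiv track=rewrite | github.com/Jiafeng-Li-Git/picovoice_interview | find_word_combos_with_pronounciation.py | find_word_combos_with_pronunciation
-- ===== SOURCE A (Python) =====
-- extended_dict = {("AE", "B", "AH", "K", "AH", "S"): ["ABACUS"],
--                  ("B", "UH", "K"): ["BOOK"],
--                  ("DH", "EH", "R"): ["THEIR", "THERE"],
--                  ("T", "AH", "M", "AA", "T", "OW"): ["TOMATO"],
--                  ("DH"): ["THE"],
--                  }
--
-- def find_word_combos_with_pronunciation(phonemes):
--     # Initialize an empty list to hold the output text
--     text = []
--
--     # Iterate over each possible sublist of the input phonemes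
--     i = 0
--     while i < len(phonemes):
--         for j in range(i + 1, len(phonemes) + 1):
--             sublist = phonemes[i:j]
--
--             # Check if the sublist corresponds to a word in the phoneme map
--             if tuple(sublist) in extended_dict:
--                 # If the sublist has multiple possible words, append all of them to the output text
--                 possible_words = extended_dict[tuple(sublist)]
--                 if not text:
--                     text = [[word] for word in possible_words]
--                 else:
--                     new_text = []
--                     for word in possible_words:
--                         for t in text:
--                             new_text.append(t + [word])
--                     text = new_text
--                 i = j
--                 break
--             elif j == len(phonemes):
--                 # If the sublist doesn't correspond to a word and it's the last sublist, append the first phoneme to the output text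
--                 if not text:
--                     text = [[phonemes[i]]]
--                 else:
--                     new_text = []
--                     for t in text:
--                         new_text.append(t + [phonemes[i]])
--                     text = new_text
--                 i = j
--                 break
--
--     return text
-- ===== SOURCE B (Python) =====
-- extended_dict = {("AE", "B", "AH", "K", "AH", "S"): ["ABACUS"],
--                  ("B", "UH", "K"): ["BOOK"],
--                  ("DH", "EH", "R"): ["THEIR", "THERE"],
--                  ("T", "AH", "M", "AA", "T", "OW"): ["TOMATO"],
--                  ("DH"): ["THE"],
--                  }
--
--
-- def _segment(phonemes):
--     # Greedy segmentation: repeatedly peel off the shortest dict-matching prefix;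
--     # when no prefix of the remainder matches, emit its first phoneme and stop
--     # (dropping the rest, as the original does).
--     segs = []
--     rest = phonemes
--     while rest:
--         for k in range(1, len(rest) + 1):
--             words = extended_dict.get(tuple(rest[:k]))
--             if words is not None:
--                 segs.append(words)
--                 rest = rest[k:]
--                 break
--         else:
--             segs.append([rest[0]])
--             rest = []
--     return segs
--
--
-- def _combos(segs):
--     # Cartesian product of the segments' word lists, with the FIRST position
--     # varying fastest (the original's ordering).
--     if not segs:
--         return [[]]
--     tails = _combos(segs[1:])
--     return [[w] + tail for tail in tails for w in segs[0]]
--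
--
-- def find_word_combos_with_pronunciation(phonemes):
--     segs = _segment(phonemes)
--     if not segs:
--         return []
--     return _combos(segs)
-- ===== Notes on version B (the rewrite author's own statement) =====
-- stated objective: simpler
-- what changed: A interleaves greedy matching with incremental combination lists rebuilt at every step; B decomposes the task into a greedy segmentation pass over the remaining suffix followed by one recursive Cartesian-product pass over the collected word lists (first position varying fastest, matching A's ordering).
import Mathlib
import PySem

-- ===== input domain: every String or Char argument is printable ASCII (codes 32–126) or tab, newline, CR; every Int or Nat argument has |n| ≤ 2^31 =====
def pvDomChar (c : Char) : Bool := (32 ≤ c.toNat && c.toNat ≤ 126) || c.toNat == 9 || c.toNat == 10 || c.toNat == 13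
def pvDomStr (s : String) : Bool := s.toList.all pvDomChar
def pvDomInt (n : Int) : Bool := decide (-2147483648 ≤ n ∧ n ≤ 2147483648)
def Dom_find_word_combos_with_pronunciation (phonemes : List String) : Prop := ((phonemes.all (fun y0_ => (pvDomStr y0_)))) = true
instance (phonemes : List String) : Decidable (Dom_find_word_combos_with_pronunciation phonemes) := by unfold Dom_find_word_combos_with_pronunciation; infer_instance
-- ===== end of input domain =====

-- B re-decomposes A's single interleaved loop into a greedy segmentation pass plus a recursive
-- Cartesian-product pass (objective: simpler); the return value is proved identical.
-- The fuel parameters below are totality guards only: each loop's fuel provably outlasts it.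

-- ===== PORT A =====

-- The module-level dict; its tuple keys as List String.  The fifth entry's key ("DH") is the
-- PYTHON STRING "DH" (no trailing comma), which can never equal tuple(sublist); since both
-- programs only ever query with tuples, omitting that entry from this tuple-keyed table is exact.
def pvExtDict : List (List String × List String) :=
  [ (["AE", "B", "AH", "K", "AH", "S"], ["ABACUS"]),
    (["B", "UH", "K"], ["BOOK"]),
    (["DH", "EH", "R"], ["THEIR", "THERE"]),
    (["T", "AH", "M", "AA", "T", "OW"], ["TOMATO"]) ]

-- 'extended_dict[tuple(k)] if tuple(k) in extended_dict else None' over the tuple keys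
def pvLookup (k : List String) : Option (List String) :=
  (pvExtDict.find? (fun p => p.1 == k)).map (fun p => p.2)

-- A's inner 'for j in range(i+1, len(phonemes)+1)' loop: returns (new i, matched words or none);
-- phonemes[i:j] = (drop i).take (j-i) by PySem.List.slice_natCast (i, j natural here)
def pvScanA (ph : List String) (i j fuel : Nat) : Nat × Option (List String) :=
  match fuel with
  | 0 => (ph.length, none)
  | fuel + 1 =>
    match pvLookup ((ph.drop i).take (j - i)) with
    | some ws => (j, some ws)
    | none => if j < ph.length then pvScanA ph i (j + 1) fuel else (ph.length, none)

-- A's outer while loop: text is the accumulated combinations, i the cursor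
def pvLoopA (ph : List String) (text : List (List String)) (i fuel : Nat) : List (List String) :=
  match fuel with
  | 0 => text
  | fuel + 1 =>
    if i < ph.length then
      match pvScanA ph i (i + 1) ph.length with
      | (j, some ws) =>
          pvLoopA ph
            (if text = [] then ws.map (fun w => [w])
             else ws.flatMap (fun w => text.map (fun t => t ++ [w]))) j fuel
      | (j, none) =>
          pvLoopA ph
            (if text = [] then [[PySem.List.pyGetD ph (i : Int) ""]]
             else text.map (fun t => t ++ [PySem.List.pyGetD ph (i : Int) ""])) j fuel
    else text

def find_word_combos_with_pronunciation (phonemes : List String) : List (List String) :=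
  pvLoopA phonemes [] 0 (phonemes.length + 1)

-- ===== PORT B =====

-- B's inner 'for k in range(1, len(rest)+1) … else' loop: first dict-matching prefix of rest
def pvFindPrefix (rest : List String) (k fuel : Nat) : Option (List String × Nat) :=
  match fuel with
  | 0 => none
  | fuel + 1 =>
    if k ≤ rest.length then
      match pvLookup (rest.take k) with   -- rest[:k] (PySem.List.slice_to_natCast)
      | some ws => some (ws, k)
      | none => pvFindPrefix rest (k + 1) fuel
    else none

-- B's _segment while loop over the remaining suffix
def pvSegLoop (rest : List String) (segs : List (List String)) (fuel : Nat) : List (List String) :=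
  match fuel with
  | 0 => segs
  | fuel + 1 =>
    if rest = [] then segs
    else
      match pvFindPrefix rest 1 rest.length with
      | some (ws, k) => pvSegLoop (rest.drop k) (segs ++ [ws]) fuel   -- rest[k:] (slice_from_natCast)
      | none => segs ++ [[rest.headD ""]]   -- rest[0]; then rest = [] ends the loop

-- B's _combos: Cartesian product, first position varying fastest
def pvCombos : List (List String) → List (List String)
  | [] => [[]]
  | s :: rest => (pvCombos rest).flatMap (fun tail => s.map (fun w => [w] ++ tail))

def find_word_combos_with_pronunciation_alt (phonemes : List String) : List (List String) :=
  let segs := pvSegLoop phonemes [] (phonemes.length + 1)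
  if segs = [] then [] else pvCombos segs

-- ===== PRECONDITION & SPEC =====
def Spec_find_word_combos_with_pronunciation (phonemes : List String) (out : List (List String)) : Prop := out = find_word_combos_with_pronunciation_alt phonemes
instance (phonemes : List String) (out : List (List String)) : Decidable (Spec_find_word_combos_with_pronunciation phonemes out) := by unfold Spec_find_word_combos_with_pronunciation; infer_instance

-- ===== CLAIM (what is proved, stated in full; the proofs are below) =====
def Claim_equal_find_word_combos_with_pronunciation : Prop := ∀ (phonemes : List String), Dom_find_word_combos_with_pronunciation phonemes → Spec_find_word_combos_with_pronunciation phonemes (find_word_combos_with_pronunciation phonemes)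

-- ===== LEMMAS AND PROOFS =====

-- A's running 'text', expressed through B's segments ([] stands for "no segment yet")
def pvMix (segs : List (List String)) : List (List String) :=
  if segs = [] then [] else pvCombos segs

theorem pvMapSingleton (ws : List String) :
    List.map (fun w => [w]) ws = List.flatMap (fun w => [[w]]) ws := by
  induction ws with
  | nil => rfl
  | cons a t ih => simp only [List.map_cons, List.flatMap_cons, ih]; rfl

theorem pvLookup_ne_nil {k ws : List String} (h : pvLookup k = some ws) : ws ≠ [] := by
  unfold pvLookup at h
  rcases ho : pvExtDict.find? (fun p => p.1 == k) with _ | p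
  · rw [ho] at h; simp at h
  · rw [ho] at h; simp at h
    have hm := List.mem_of_find?_eq_some ho
    subst h
    fin_cases hm <;> simp

theorem pvFindPrefix_bounds (rest : List String) :
    ∀ fuel k ws k', pvFindPrefix rest k fuel = some (ws, k') → k ≤ k' ∧ k' ≤ rest.length := by
  intro fuel
  induction fuel with
  | zero => intro k ws k' h; simp [pvFindPrefix] at h
  | succ fuel ih =>
      intro k ws k' h
      simp only [pvFindPrefix] at h
      by_cases hk : k ≤ rest.length
      · rw [if_pos hk] at h
        rcases hl : pvLookup (rest.take k) with _ | ws0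
        · rw [hl] at h; have := ih (k + 1) ws k' h; omega
        · rw [hl] at h; simp at h; omega
      · rw [if_neg hk] at h; simp at h

theorem pvFindPrefix_ws_ne_nil (rest : List String) :
    ∀ fuel k ws k', pvFindPrefix rest k fuel = some (ws, k') → ws ≠ [] := by
  intro fuel
  induction fuel with
  | zero => intro k ws k' h; simp [pvFindPrefix] at h
  | succ fuel ih =>
      intro k ws k' h
      simp only [pvFindPrefix] at h
      by_cases hk : k ≤ rest.length
      · rw [if_pos hk] at h
        rcases hl : pvLookup (rest.take k) with _ | ws0
        · rw [hl] at h; exact ih (k + 1) ws k' h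
        · rw [hl] at h; simp at h; exact h.1 ▸ pvLookup_ne_nil hl
      · rw [if_neg hk] at h; simp at h

theorem pvFindPrefix_oob (rest : List String) (fuel k : Nat) (h : rest.length < k) :
    pvFindPrefix rest k fuel = none := by
  cases fuel with
  | zero => rfl
  | succ fuel => simp only [pvFindPrefix]; rw [if_neg (by omega)]

theorem pvCombos_append (segs : List (List String)) (ws : List String) :
    pvCombos (segs ++ [ws]) = ws.flatMap (fun w => (pvCombos segs).map (fun t => t ++ [w])) := by
  induction segs with
  | nil =>
      show pvCombos [ws] = _
      simp only [pvCombos, List.flatMap_cons, List.flatMap_nil, List.append_nil]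
      simp [pvMapSingleton]
  | cons s rest ih =>
      simp only [List.cons_append, pvCombos, ih]
      simp [List.flatMap_map, List.map_flatMap, List.flatMap_assoc, Function.comp_def]

theorem pvCombos_ne_nil {segs : List (List String)} (h : ∀ s ∈ segs, s ≠ []) :
    pvCombos segs ≠ [] := by
  induction segs with
  | nil => simp [pvCombos]
  | cons s rest ih =>
      have hs := h s (by simp)
      have hr := ih (fun x hx => h x (by simp [hx]))
      simp only [pvCombos]
      intro hflat
      rw [List.flatMap_eq_nil_iff] at hflat
      rcases List.exists_mem_of_ne_nil _ hr with ⟨c, hc⟩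
      exact hs (by simpa using hflat _ hc)

-- one A-step of text-extension, through pvMix
theorem pvMix_step {segs : List (List String)} (hseg : ∀ s ∈ segs, s ≠ []) (ws : List String) :
    (if pvMix segs = [] then ws.map (fun w => [w])
     else ws.flatMap (fun w => (pvMix segs).map (fun t => t ++ [w]))) = pvMix (segs ++ [ws]) := by
  by_cases h : segs = []
  · subst h
    simp only [pvMix, List.nil_append, pvCombos, if_pos]
    simp [pvMapSingleton]
  · have hne := pvCombos_ne_nil hseg
    simp [pvMix, h, hne, pvCombos_append]

-- the exhausted outer loop returns text, whatever fuel remains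
theorem pvLoopA_stop (ph : List String) (text : List (List String)) {i : Nat}
    (h : ¬ i < ph.length) : ∀ fuel, pvLoopA ph text i fuel = text := by
  intro fuel; cases fuel with
  | zero => rfl
  | succ fuel => simp only [pvLoopA]; rw [if_neg h]

-- scan correspondence: A's inner j-scan at (i, j) is B's prefix search at k = j - i on drop i
theorem pvScan_eq (ph : List String) (i : Nat) :
    ∀ f g j, i < j → j ≤ ph.length → ph.length - j < f → ph.length - j < g →
    pvScanA ph i j f = (match pvFindPrefix (ph.drop i) (j - i) g with
      | some (ws, k) => (i + k, some ws)
      | none => (ph.length, none)) := by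
  intro f
  induction f with
  | zero => intro g j _ _ hf _; omega
  | succ f ih =>
      intro g j hij hj hf hg
      cases g with
      | zero => omega
      | succ g =>
          have hkle : j - i ≤ (ph.drop i).length := by
            simp only [List.length_drop]; omega
          simp only [pvScanA, pvFindPrefix]
          rw [if_pos hkle]
          rcases hl : pvLookup ((ph.drop i).take (j - i)) with _ | ws
          · show (if j < ph.length then pvScanA ph i (j + 1) f else (ph.length, none))
               = (match pvFindPrefix (ph.drop i) (j - i + 1) g with
                  | some (ws, k) => (i + k, some ws)
                  | none => (ph.length, none))
            by_cases hjl : j < ph.length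
            · rw [if_pos hjl]
              have h1 : j + 1 - i = j - i + 1 := by omega
              rw [ih g (j + 1) (by omega) (by omega) (by omega) (by omega), h1]
            · rw [if_neg hjl]
              rw [pvFindPrefix_oob (ph.drop i) g (j - i + 1)
                (by simp only [List.length_drop]; omega)]
          · show (j, some ws) = (i + (j - i), some ws)
            have hji : i + (j - i) = j := by omega
            rw [hji]

-- main loop correspondence: A's while loop over i = B's segmentation of the suffix + product
theorem pvLoop_eq (ph : List String) :
    ∀ f i segs g, ph.length - i < f → (ph.drop i).length < g → (∀ s ∈ segs, s ≠ []) →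
    pvLoopA ph (pvMix segs) i f = pvMix (pvSegLoop (ph.drop i) segs g) := by
  intro f
  induction f with
  | zero => intro i segs g hf _ _; omega
  | succ f ih =>
      intro i segs g hf hg hseg
      cases g with
      | zero => omega
      | succ g =>
          by_cases hi : i < ph.length
          · have hrest : ph.drop i ≠ [] := by
              intro h0; have := congrArg List.length h0
              simp only [List.length_drop, List.length_nil] at this; omega
            have hlen : (ph.drop i).length = ph.length - i := List.length_drop
            have hscan := pvScan_eq ph i ph.length (ph.drop i).length (i + 1)
              (by omega) (by omega) (by omega) (by omega)
            have h1 : i + 1 - i = 1 := by omega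
            rw [h1] at hscan
            simp only [pvLoopA]
            rw [if_pos hi, hscan]
            conv_rhs => rw [pvSegLoop]
            rw [if_neg hrest]
            rcases hp : pvFindPrefix (ph.drop i) 1 (ph.drop i).length with _ | ⟨ws, k⟩
            · -- no prefix of the remainder matches: both emit the head phoneme and stop
              show pvLoopA ph
                  (if pvMix segs = [] then [[PySem.List.pyGetD ph (i : Int) ""]]
                   else (pvMix segs).map (fun t => t ++ [PySem.List.pyGetD ph (i : Int) ""]))
                  ph.length f = _
              have hstep := pvMix_step hseg [PySem.List.pyGetD ph (i : Int) ""]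
              simp only [List.map_cons, List.map_nil, List.flatMap_cons, List.flatMap_nil,
                List.append_nil] at hstep
              rw [hstep, pvLoopA_stop ph _ (lt_irrefl _) f]
              show pvMix (segs ++ [[PySem.List.pyGetD ph (i : Int) ""]])
                 = pvMix (segs ++ [[(ph.drop i).headD ""]])
              have hx : PySem.List.pyGetD ph (i : Int) "" = (ph.drop i).headD "" := by
                rw [PySem.List.pyGetD_natCast, List.headD_eq_head?, List.head?_drop,
                  List.getD_eq_getElem?_getD]
              rw [hx]
            · -- shortest matching prefix found: both consume it and append its word list
              show pvLoopA ph
                  (if pvMix segs = [] then ws.map (fun w => [w])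
                   else ws.flatMap (fun w => (pvMix segs).map (fun t => t ++ [w])))
                  (i + k) f = _
              have hb := pvFindPrefix_bounds (ph.drop i) (ph.drop i).length 1 ws k hp
              have hsegs' : ∀ s ∈ segs ++ [ws], s ≠ [] := by
                intro s hsm
                rcases List.mem_append.mp hsm with h' | h'
                · exact hseg s h'
                · simp at h'; subst h'
                  exact pvFindPrefix_ws_ne_nil (ph.drop i) (ph.drop i).length 1 s k hp
              rw [pvMix_step hseg ws]
              show pvLoopA ph (pvMix (segs ++ [ws])) (i + k) f
                 = pvMix (pvSegLoop ((ph.drop i).drop k) (segs ++ [ws]) g)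
              rw [List.drop_drop]
              exact ih (i + k) (segs ++ [ws]) g (by omega)
                (by simp only [List.length_drop]; omega) hsegs' 
          · rw [pvLoopA_stop ph _ hi, List.drop_eq_nil_of_le (by omega), pvSegLoop,
              if_pos rfl]

-- ===== VERDICT (by name: the statement is the Claim_ definition above) =====
theorem find_word_combos_with_pronunciation_spec : Claim_equal_find_word_combos_with_pronunciation := by
  intro ph _
  unfold Spec_find_word_combos_with_pronunciation
  show pvLoopA ph [] 0 (ph.length + 1)
     = if pvSegLoop ph [] (ph.length + 1) = [] then [] else pvCombos (pvSegLoop ph [] (ph.length + 1))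
  have h := pvLoop_eq ph (ph.length + 1) 0 [] (ph.length + 1) (by omega)
    (by simp only [List.drop_zero]; omega) (by simp)
  rw [List.drop_zero] at h
  exact h
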